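-- pv_equiv track=rewrite | github.com/Jeetski/Chronos_Engine | modules/console.py | _extract_runtime_options
-- ===== SOURCE A (Python) =====
-- def _to_bool_token(value):
--     if isinstance(value, bool):
--         return value
--     s = str(value or "").strip().lower()
--     if s in {"true", "1", "yes", "on"}:
--         return True
--     if s in {"false", "0", "no", "off"}:
--         return False
--     return None
--
-- def _extract_runtime_options(argv_tokens):
--     """
--     Parse runtime-only key:value tokens from argv without using -- switches.
--     Supported:
--       prompt_toolkit:true|false
--       autocomplete:true|false
--       startup_banner:true|false
--       startup_sync:true|false
--       startup_sound:true|false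
--     Returns: (options_dict, remaining_tokens)
--     """
--     options = {
--         "prompt_toolkit": None,
--         "autocomplete": None,
--         "startup_banner": None,
--         "startup_sync": None,
--         "startup_sound": None,
--     }
--     remaining = []
--     for tok in (argv_tokens or []):
--         t = str(tok or "").strip()
--         if not _is_property_token(t):
--             remaining.append(tok)
--             continue
--         key, _sep, val = t.partition(":")
--         k = key.strip().lower()
--         b = _to_bool_token(val)
--         if k in {"prompt_toolkit", "ptk"} and b is not None:
--             options["prompt_toolkit"] = b
--             continue
--         if k in {"autocomplete", "autosuggest", "suggestions"} and b is not None: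
--             options["autocomplete"] = b
--             continue
--         if k in {"startup_banner", "banner"} and b is not None:
--             options["startup_banner"] = b
--             continue
--         if k in {"startup_sync", "sync_on_startup"} and b is not None:
--             options["startup_sync"] = b
--             continue
--         if k in {"startup_sound", "sound_on_startup"} and b is not None:
--             options["startup_sound"] = b
--             continue
--         remaining.append(tok)
--     return options, remaining
--
-- def _is_property_token(token: str) -> bool:
--     if not isinstance(token, str):
--         return False
--     # Only treat as property if it looks like key:value with a valid key
--     # Avoid catching Windows paths like C:\foo
--     if ":" not in token:
--         return False
--     key, _sep, _rest = token.partition(":")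
--     return key and key[0].isalpha() and all(c.isalnum() or c == '_' for c in key)
-- ===== SOURCE B (Python) =====
-- _GROUPS = [
--     ("prompt_toolkit", ("prompt_toolkit", "ptk")),
--     ("autocomplete", ("autocomplete", "autosuggest", "suggestions")),
--     ("startup_banner", ("startup_banner", "banner")),
--     ("startup_sync", ("startup_sync", "sync_on_startup")),
--     ("startup_sound", ("startup_sound", "sound_on_startup")),
-- ]
-- _BOOL_WORDS = {"true": True, "1": True, "yes": True, "on": True,
--                "false": False, "0": False, "no": False, "off": False}
--
-- def _classify(tok):
--     """(canonical_key, bool) if tok is a recognised runtime option token, else None."""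
--     t = str(tok or "").strip()
--     head, sep, tail = t.partition(":")
--     if not sep or not head or not head[0].isalpha():
--         return None
--     if not all(c.isalnum() or c == "_" for c in head):
--         return None
--     k = head.lower()
--     for canon, aliases in _GROUPS:
--         if k in aliases:
--             b = _BOOL_WORDS.get(tail.strip().lower())
--             return None if b is None else (canon, b)
--     return None
--
-- def _last_setting(toks, canon):
--     """Value of the last option token naming `canon`, or None (last write wins)."""
--     for tok in reversed(toks):
--         p = _classify(tok)
--         if p is not None and p[0] == canon:
--             return p[1]
--     return None
--
-- def _extract_runtime_options(argv_tokens):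
--     toks = list(argv_tokens or [])
--     options = {canon: _last_setting(toks, canon) for canon, _ in _GROUPS}
--     remaining = [tok for tok in toks if _classify(tok) is None]
--     return options, remaining
-- ===== Notes on version B (the rewrite author's own statement) =====
-- stated objective: alternative
-- what changed: Instead of A's single pass threading a mutable options dict through a five-way if/elif chain, B classifies each token once and computes each option independently as the value of the LAST matching token (a reverse scan per canonical key, last-write-wins), building remaining by a separate filter.
import Mathlib
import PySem

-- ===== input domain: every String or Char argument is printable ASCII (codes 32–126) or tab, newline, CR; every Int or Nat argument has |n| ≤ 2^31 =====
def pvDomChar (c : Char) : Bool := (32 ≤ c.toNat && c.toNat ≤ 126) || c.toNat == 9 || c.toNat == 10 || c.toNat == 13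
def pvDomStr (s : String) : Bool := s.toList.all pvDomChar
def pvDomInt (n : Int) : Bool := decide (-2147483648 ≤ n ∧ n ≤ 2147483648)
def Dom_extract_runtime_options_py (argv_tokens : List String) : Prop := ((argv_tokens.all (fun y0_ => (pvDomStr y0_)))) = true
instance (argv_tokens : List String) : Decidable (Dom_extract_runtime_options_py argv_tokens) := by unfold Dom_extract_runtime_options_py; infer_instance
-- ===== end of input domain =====

-- B replaces A's single-pass mutable-dict if/elif chain by a per-token classifier,
-- a last-matching-token reverse scan per canonical key, and a separate filter for
-- the remaining tokens (alternative decomposition, same cost).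


-- ===== PORT A =====
-- str.partition(":") ported by hand: the part before the first ':' and the part after it
-- (exact: takeWhile/dropWhile split at the first ':').
def pvPartHead (t : List Char) : List Char := t.takeWhile (fun c => c != ':')
def pvPartTail (t : List Char) : List Char := (t.dropWhile (fun c => c != ':')).drop 1

-- _to_bool_token (the string branch; callers always pass a str)
def pvToBoolTok (val : List Char) : Option Bool :=
  let s := PySem.Chars.lower (PySem.Chars.strip val)
  if s = "true".toList ∨ s = "1".toList ∨ s = "yes".toList ∨ s = "on".toList then some true
  else if s = "false".toList ∨ s = "0".toList ∨ s = "no".toList ∨ s = "off".toList then some false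
  else none

-- _is_property_token
def pvIsPropertyToken (t : List Char) : Bool :=
  if !(PySem.Chars.isIn [':'] t) then false
  else
    let key := pvPartHead t
    !key.isEmpty &&
      (match key.head? with | some c => PySem.Chars.isalpha c | none => false) &&
      key.all (fun c => PySem.Chars.isalnum c || c == '_')

def pvInitOptions : PySem.Dict String (Option Bool) :=
  PySem.Dict.ofList [("prompt_toolkit", none), ("autocomplete", none), ("startup_banner", none),
                     ("startup_sync", none), ("startup_sound", none)]

def pvStepA (st : PySem.Dict String (Option Bool) × List String) (tok : String) :
    PySem.Dict String (Option Bool) × List String :=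
  let options := st.1
  let remaining := st.2
  let t := PySem.Chars.strip tok.toList
  if !pvIsPropertyToken t then (options, remaining ++ [tok])
  else
    let k := PySem.Chars.lower (PySem.Chars.strip (pvPartHead t))
    let b := pvToBoolTok (pvPartTail t)
    if (k = "prompt_toolkit".toList ∨ k = "ptk".toList) ∧ b ≠ none then
      (options.insert "prompt_toolkit" b, remaining)
    else if (k = "autocomplete".toList ∨ k = "autosuggest".toList ∨ k = "suggestions".toList) ∧ b ≠ none then
      (options.insert "autocomplete" b, remaining)
    else if (k = "startup_banner".toList ∨ k = "banner".toList) ∧ b ≠ none then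
      (options.insert "startup_banner" b, remaining)
    else if (k = "startup_sync".toList ∨ k = "sync_on_startup".toList) ∧ b ≠ none then
      (options.insert "startup_sync" b, remaining)
    else if (k = "startup_sound".toList ∨ k = "sound_on_startup".toList) ∧ b ≠ none then
      (options.insert "startup_sound" b, remaining)
    else (options, remaining ++ [tok])

def extract_runtime_options_py (argv_tokens : List String) :
    (List (String × Option Bool)) × List String :=
  let res := argv_tokens.foldl pvStepA (pvInitOptions, [])
  (res.1.items, res.2)

-- ===== PORT B =====
def pvGroups : List (String × List (List Char)) :=
  [("prompt_toolkit", ["prompt_toolkit".toList, "ptk".toList]),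
   ("autocomplete", ["autocomplete".toList, "autosuggest".toList, "suggestions".toList]),
   ("startup_banner", ["startup_banner".toList, "banner".toList]),
   ("startup_sync", ["startup_sync".toList, "sync_on_startup".toList]),
   ("startup_sound", ["startup_sound".toList, "sound_on_startup".toList])]

def pvBoolWords : PySem.Dict (List Char) Bool :=
  PySem.Dict.ofList
    [("true".toList, true), ("1".toList, true), ("yes".toList, true), ("on".toList, true),
     ("false".toList, false), ("0".toList, false), ("no".toList, false), ("off".toList, false)]

-- _classify (str.partition(":") ported by hand as the first-':' split, like in port A)
def pvClassify (tok : String) : Option (String × Bool) :=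
  let t := PySem.Chars.strip tok.toList
  let head := t.takeWhile (fun c => c != ':')
  let rest := t.dropWhile (fun c => c != ':')
  let tail := rest.drop 1
  if rest.isEmpty || head.isEmpty ||
      !(match head.head? with | some c => PySem.Chars.isalpha c | none => false) then none
  else if !(head.all (fun c => PySem.Chars.isalnum c || c == '_')) then none
  else
    let k := PySem.Chars.lower head
    match pvGroups.find? (fun g => g.2.contains k) with
    | some (canon, _) =>
      match pvBoolWords.get? (PySem.Chars.lower (PySem.Chars.strip tail)) with
      | some b => some (canon, b)
      | none => none
    | none => none

-- _last_setting: scan the reversed token list for the first classified hit on `canon`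
def pvLastAux (canon : String) : List String → Option Bool
  | [] => none
  | t :: ts =>
    match pvClassify t with
    | some (k, b) => if k == canon then some b else pvLastAux canon ts
    | none => pvLastAux canon ts

def pvLastSetting (toks : List String) (canon : String) : Option Bool :=
  pvLastAux canon toks.reverse

def extract_runtime_options_py_alt (argv_tokens : List String) :
    (List (String × Option Bool)) × List String :=
  (pvGroups.map (fun g => (g.1, pvLastSetting argv_tokens g.1)),
   argv_tokens.filter (fun tok => (pvClassify tok).isNone))

-- ===== PRECONDITION & SPEC =====
def Spec_extract_runtime_options_py (argv_tokens : List String) (out : (List (String × Option Bool)) × List String) : Prop := out = extract_runtime_options_py_alt argv_tokens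
instance (argv_tokens : List String) (out : (List (String × Option Bool)) × List String) : Decidable (Spec_extract_runtime_options_py argv_tokens out) := by unfold Spec_extract_runtime_options_py; infer_instance

-- ===== CLAIM (what is proved, stated in full; the proofs are below) =====
def Claim_equal_extract_runtime_options_py : Prop := ∀ (argv_tokens : List String), Dom_extract_runtime_options_py argv_tokens → Spec_extract_runtime_options_py argv_tokens (extract_runtime_options_py argv_tokens)

-- ===== LEMMAS AND PROOFS =====

-- an alnum-or-underscore character is not Python whitespace
theorem notspace_of_alnum (c : Char) (h : (PySem.Chars.isalnum c || c == '_') = true) :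
    PySem.Chars.isspace c = false := by
  have hn : c = '_' → c.toNat = 95 := fun h => by rw [h]; rfl
  simp only [PySem.Chars.isalnum, PySem.Chars.isalpha, PySem.Chars.isupper, PySem.Chars.islower,
        PySem.Chars.isdigit, Bool.or_eq_true, Bool.and_eq_true, decide_eq_true_eq, beq_iff_eq] at h
  have h32 : PySem.Chars.isspace c = (decide (c.toNat = 32) || (decide (9 ≤ c.toNat) && decide (c.toNat ≤ 13)) || (decide (28 ≤ c.toNat) && decide (c.toNat ≤ 31)) || decide (c.toNat = 133) || decide (c.toNat = 160) || decide (c.toNat = 5760) || (decide (8192 ≤ c.toNat) && decide (c.toNat ≤ 8202)) || decide (c.toNat = 8232) || decide (c.toNat = 8233) || decide (c.toNat = 8239) || decide (c.toNat = 8287) || decide (c.toNat = 12288)) := rfl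
  rw [h32]
  simp only [Bool.or_eq_false_iff, Bool.and_eq_false_iff, decide_eq_false_iff_not]
  rcases h with ((⟨h1,h2⟩|⟨h1,h2⟩)|⟨h1,h2⟩) | h
  · have g1 : 65 ≤ c.toNat := h1; have g2 : c.toNat ≤ 90 := h2; omega
  · have g1 : 97 ≤ c.toNat := h1; have g2 : c.toNat ≤ 122 := h2; omega
  · have g1 : 48 ≤ c.toNat := h1; have g2 : c.toNat ≤ 57 := h2; omega
  · have := hn h; omega

theorem strip_id (l : List Char) (h : ∀ c ∈ l, PySem.Chars.isspace c = false) :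
    PySem.Chars.strip l = l := by
  unfold PySem.Chars.strip PySem.Chars.lstrip PySem.Chars.rstrip
  have h1 : l.dropWhile PySem.Chars.isspace = l :=
    List.dropWhile_eq_self_iff.mpr (fun hl => by simp [h _ (l.getElem_mem hl)])
  rw [h1]
  have h2 : l.reverse.dropWhile PySem.Chars.isspace = l.reverse :=
    List.dropWhile_eq_self_iff.mpr (fun hl => by
      have hm := List.mem_reverse.mp (l.reverse.getElem_mem hl)
      simp only [List.getElem_reverse, Nat.sub_zero] at hm
      simp [h _ hm])
  rw [h2, List.reverse_reverse]

theorem singleton_infix_iff (a : Char) (l : List Char) : [a] <:+: l ↔ a ∈ l := by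
  constructor
  · intro h; exact List.singleton_sublist.mp h.sublist
  · intro h
    obtain ⟨s, t, rfl⟩ := List.append_of_mem h
    exact ⟨s, t, by simp⟩

theorem isIn_colon (t : List Char) :
    PySem.Chars.isIn [':'] t = !(t.dropWhile (fun c => c != ':')).isEmpty := by
  cases h : (t.dropWhile (fun c => c != ':')).isEmpty with
  | true =>
    have hnil : t.dropWhile (fun c => c != ':') = [] := by
      cases h2 : t.dropWhile (fun c => c != ':') <;> simp_all
    have : ':' ∉ t := by
      intro hc
      have := List.dropWhile_eq_nil_iff.mp hnil ':' hc
      simp at this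
    simp only [Bool.not_true]
    cases hI : PySem.Chars.isIn [':'] t with
    | false => rfl
    | true =>
      exact absurd ((singleton_infix_iff _ _).mp ((PySem.Chars.isIn_iff_infix _ _).mp hI)) this
  | false =>
    have hne : t.dropWhile (fun c => c != ':') ≠ [] := by
      intro h2; rw [h2] at h; simp at h
    have : ':' ∈ t := by
      by_contra hc
      exact hne (List.dropWhile_eq_nil_iff.mpr (fun x hx => by
        simp only [bne_iff_ne, ne_eq]
        rintro rfl; exact hc hx))
    simp only [Bool.not_false]
    exact (PySem.Chars.isIn_iff_infix _ _).mpr ((singleton_infix_iff _ _).mpr this)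

theorem isProp_eq (t : List Char) :
    pvIsPropertyToken t =
      (!(t.dropWhile (fun c => c != ':')).isEmpty &&
       (!(t.takeWhile (fun c => c != ':')).isEmpty &&
        ((match (t.takeWhile (fun c => c != ':')).head? with
          | some c => PySem.Chars.isalpha c | none => false) &&
         (t.takeWhile (fun c => c != ':')).all (fun c => PySem.Chars.isalnum c || c == '_')))) := by
  unfold pvIsPropertyToken pvPartHead
  rw [isIn_colon]
  cases (t.dropWhile (fun c => c != ':')).isEmpty <;> simp [Bool.and_assoc]

-- _to_bool_token equals a lookup in B's bool-word table
theorem toBool_eq_get (tail : List Char) :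
    pvToBoolTok tail = pvBoolWords.get? (PySem.Chars.lower (PySem.Chars.strip tail)) := by
  unfold pvToBoolTok
  generalize PySem.Chars.lower (PySem.Chars.strip tail) = v
  have hB : pvBoolWords = PySem.Dict.mk
    [("true".toList, true), ("1".toList, true), ("yes".toList, true), ("on".toList, true),
     ("false".toList, false), ("0".toList, false), ("no".toList, false), ("off".toList, false)] := by decide
  rw [hB]
  simp only [PySem.Dict.get?_mk_cons, beq_iff_eq]
  have hget : (PySem.Dict.mk ([] : List (List Char × Bool))).get? v = none := rfl
  rw [hget]
  split_ifs <;> simp_all <;> tauto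

-- the five-way alias chain of A equals B's group search + bool-word lookup
set_option maxHeartbeats 1000000 in
theorem chain_eq (d : PySem.Dict String (Option Bool)) (rem : List String) (tok : String)
    (k tail : List Char) :
    (if (k = "prompt_toolkit".toList ∨ k = "ptk".toList) ∧ pvToBoolTok tail ≠ none then
       (d.insert "prompt_toolkit" (pvToBoolTok tail), rem)
     else if (k = "autocomplete".toList ∨ k = "autosuggest".toList ∨ k = "suggestions".toList) ∧ pvToBoolTok tail ≠ none then
       (d.insert "autocomplete" (pvToBoolTok tail), rem)
     else if (k = "startup_banner".toList ∨ k = "banner".toList) ∧ pvToBoolTok tail ≠ none then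
       (d.insert "startup_banner" (pvToBoolTok tail), rem)
     else if (k = "startup_sync".toList ∨ k = "sync_on_startup".toList) ∧ pvToBoolTok tail ≠ none then
       (d.insert "startup_sync" (pvToBoolTok tail), rem)
     else if (k = "startup_sound".toList ∨ k = "sound_on_startup".toList) ∧ pvToBoolTok tail ≠ none then
       (d.insert "startup_sound" (pvToBoolTok tail), rem)
     else (d, rem ++ [tok])) =
    (match (match pvGroups.find? (fun g => g.2.contains k) with
            | some (canon, _) =>
              match pvBoolWords.get? (PySem.Chars.lower (PySem.Chars.strip tail)) with
              | some b => some (canon, b)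
              | none => none
            | none => none) with
     | some (key, bv) => ((d.insert key (some bv) : PySem.Dict String (Option Bool)), rem)
     | none => (d, rem ++ [tok])) := by
  rw [← toBool_eq_get]
  by_cases hk0 : k = "prompt_toolkit".toList
  · cases hb : pvToBoolTok tail <;> simp [hk0, pvGroups]
  by_cases hk1 : k = "ptk".toList
  · cases hb : pvToBoolTok tail <;> simp [hk1, pvGroups]
  by_cases hk2 : k = "autocomplete".toList
  · cases hb : pvToBoolTok tail <;> simp [hk2, pvGroups, List.find?]
  by_cases hk3 : k = "autosuggest".toList
  · cases hb : pvToBoolTok tail <;> simp [hk3, pvGroups, List.find?]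
  by_cases hk4 : k = "suggestions".toList
  · cases hb : pvToBoolTok tail <;> simp [hk4, pvGroups, List.find?]
  by_cases hk5 : k = "startup_banner".toList
  · cases hb : pvToBoolTok tail <;> simp [hk5, pvGroups, List.find?]
  by_cases hk6 : k = "banner".toList
  · cases hb : pvToBoolTok tail <;> simp [hk6, pvGroups, List.find?]
  by_cases hk7 : k = "startup_sync".toList
  · cases hb : pvToBoolTok tail <;> simp [hk7, pvGroups, List.find?]
  by_cases hk8 : k = "sync_on_startup".toList
  · cases hb : pvToBoolTok tail <;> simp [hk8, pvGroups, List.find?]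
  by_cases hk9 : k = "startup_sound".toList
  · cases hb : pvToBoolTok tail <;> simp [hk9, pvGroups, List.find?]
  by_cases hk10 : k = "sound_on_startup".toList
  · cases hb : pvToBoolTok tail <;> simp [hk10, pvGroups, List.find?]
  · have hfind : pvGroups.find? (fun g => g.2.contains k) = none := by
      apply List.find?_eq_none.mpr
      intro g hg
      fin_cases hg <;> simp_all
    rw [hfind]
    split_ifs with h1 h2 h3 h4 h5
    · rcases h1 with ⟨h | h, -⟩
      exacts [(hk0 h).elim, (hk1 h).elim]
    · rcases h2 with ⟨h | h | h, -⟩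
      exacts [(hk2 h).elim, (hk3 h).elim, (hk4 h).elim]
    · rcases h3 with ⟨h | h, -⟩
      exacts [(hk5 h).elim, (hk6 h).elim]
    · rcases h4 with ⟨h | h, -⟩
      exacts [(hk7 h).elim, (hk8 h).elim]
    · rcases h5 with ⟨h | h, -⟩
      exacts [(hk9 h).elim, (hk10 h).elim]
    · rfl

-- per-token: A's step is determined by B's classifier
theorem stepA_eq_classify (d : PySem.Dict String (Option Bool)) (rem : List String) (tok : String) :
    pvStepA (d, rem) tok =
      match pvClassify tok with
      | some (k, b) => (d.insert k (some b), rem)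
      | none => (d, rem ++ [tok]) := by
  unfold pvStepA pvClassify pvPartHead pvPartTail
  dsimp only
  rw [isProp_eq]
  cases h0 : ((PySem.Chars.strip tok.toList).dropWhile (fun c => c != ':')).isEmpty with
  | true => simp
  | false =>
    cases h1 : ((PySem.Chars.strip tok.toList).takeWhile (fun c => c != ':')).isEmpty with
    | true => simp
    | false =>
      cases h2 : (match ((PySem.Chars.strip tok.toList).takeWhile (fun c => c != ':')).head? with
                  | some c => PySem.Chars.isalpha c | none => false) with
      | false => simp
      | true =>
        cases h3 : ((PySem.Chars.strip tok.toList).takeWhile (fun c => c != ':')).all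
                     (fun c => PySem.Chars.isalnum c || c == '_') with
        | false => simp
        | true =>
          have hstrip : PySem.Chars.strip ((PySem.Chars.strip tok.toList).takeWhile (fun c => c != ':')) =
              (PySem.Chars.strip tok.toList).takeWhile (fun c => c != ':') :=
            strip_id _ (fun c hc => notspace_of_alnum c (List.all_eq_true.mp h3 c hc))
          simp only [hstrip, Bool.not_true, Bool.not_false, Bool.and_self,
            Bool.false_eq_true, if_false]
          exact chain_eq d rem tok _ _

-- keys produced by the classifier are among the five canonical keys
theorem classify_key_mem (tok : String) (k : String) (b : Bool)
    (h : pvClassify tok = some (k, b)) :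
    k ∈ ["prompt_toolkit", "autocomplete", "startup_banner", "startup_sync", "startup_sound"] := by
  unfold pvClassify at h
  dsimp only at h
  split_ifs at h
  cases hf : pvGroups.find? (fun g => g.2.contains (PySem.Chars.lower ((PySem.Chars.strip tok.toList).takeWhile (fun c => c != ':')))) with
  | none => rw [hf] at h; simp at h
  | some g =>
    rw [hf] at h
    have hmem := List.mem_of_find?_eq_some hf
    obtain ⟨canon, aliases⟩ := g
    cases hg : pvBoolWords.get? (PySem.Chars.lower (PySem.Chars.strip (((PySem.Chars.strip tok.toList).dropWhile (fun c => c != ':')).drop 1))) with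
    | none => rw [hg] at h; simp at h
    | some bv =>
      rw [hg] at h
      simp only [Option.some.injEq, Prod.mk.injEq] at h
      have hk : canon = k := h.1
      subst hk
      fin_cases hmem <;> simp

def pvFoldF (d : PySem.Dict String (Option Bool)) (tok : String) : PySem.Dict String (Option Bool) :=
  match pvClassify tok with
  | some (k, b) => d.insert k (some b)
  | none => d

-- A's fold splits into a dict fold and the filtered remaining list
theorem fold_eq (toks : List String) (d : PySem.Dict String (Option Bool)) (rem : List String) :
    toks.foldl pvStepA (d, rem) =
      (toks.foldl pvFoldF d,
       rem ++ (toks.filter (fun tok => (pvClassify tok).isNone))) := by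
  induction toks generalizing d rem with
  | nil => simp
  | cons t ts ih =>
    simp only [List.foldl_cons, stepA_eq_classify, List.filter_cons, pvFoldF]
    cases h : pvClassify t with
    | none => simp [ih]
    | some kb => cases kb with
      | mk k b => simp [ih]

-- value at a key after the dict fold = last setting of that key (reverse-scan view)
theorem getD_fold (toks : List String) (d : PySem.Dict String (Option Bool)) (k : String) :
    (toks.foldl pvFoldF d).getD k none =
      match pvLastAux k toks.reverse with
      | some b => some b
      | none => d.getD k none := by
  induction toks using List.reverseRecOn generalizing d with
  | nil => simp [pvLastAux]
  | append_singleton ts t ih =>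
    rw [List.foldl_append]
    simp only [List.foldl_cons, List.foldl_nil, List.reverse_append, List.reverse_cons,
      List.reverse_nil, List.nil_append, List.cons_append]
    show (pvFoldF (ts.foldl pvFoldF d) t).getD k none = _
    unfold pvFoldF pvLastAux
    cases h : pvClassify t with
    | none => simpa using ih d
    | some kb =>
      obtain ⟨k0, b⟩ := kb
      rw [PySem.Dict.getD_insert]
      by_cases hk : k = k0
      · simp [hk]
      · have hbe : (k0 == k) = false := by simp [Ne.symm hk]
        rw [if_neg hk]
        dsimp only
        simp only [hbe, Bool.false_eq_true, if_false]
        exact ih d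

-- the dict fold never changes the key list (all classified keys are already present)
theorem keys_fold (toks : List String) (d : PySem.Dict String (Option Bool))
    (hd : ∀ k ∈ ["prompt_toolkit", "autocomplete", "startup_banner", "startup_sync", "startup_sound"],
        k ∈ d.keys) :
    (toks.foldl pvFoldF d).keys = d.keys := by
  induction toks generalizing d with
  | nil => rfl
  | cons t ts ih =>
    rw [List.foldl_cons]
    have hstep : (pvFoldF d t).keys = d.keys := by
      unfold pvFoldF
      cases h : pvClassify t with
      | none => rfl
      | some kb =>
        obtain ⟨k0, b⟩ := kb
        have hc : d.contains k0 = true :=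
          (PySem.Dict.contains_iff_mem_keys d k0).mpr (hd k0 (classify_key_mem t k0 b h))
        exact PySem.Dict.keys_insert_of_contains d (some b) hc
    rw [ih (pvFoldF d t) (fun k hk => hstep ▸ hd k hk), hstep]

-- ===== VERDICT (by name: the statement is the Claim_ definition above) =====
theorem extract_runtime_options_py_spec : Claim_equal_extract_runtime_options_py := by
  intro argv _
  unfold Spec_extract_runtime_options_py extract_runtime_options_py extract_runtime_options_py_alt
  rw [fold_eq]
  dsimp only
  refine Prod.ext ?_ (by simp)
  have hkeys : (argv.foldl pvFoldF pvInitOptions).keys = pvInitOptions.keys :=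
    keys_fold argv pvInitOptions (by decide)
  have hnd : (argv.foldl pvFoldF pvInitOptions).keys.Nodup := by
    rw [hkeys]; decide
  rw [PySem.Dict.items_eq_map_keys _ hnd none, hkeys]
  have hK : pvInitOptions.keys =
      ["prompt_toolkit", "autocomplete", "startup_banner", "startup_sync", "startup_sound"] := by decide
  rw [hK]
  have hval : ∀ k ∈ ["prompt_toolkit", "autocomplete", "startup_banner", "startup_sync", "startup_sound"],
      (argv.foldl pvFoldF pvInitOptions).getD k none = pvLastSetting argv k := by
    intro k hk
    rw [getD_fold, pvLastSetting]
    have h0 : pvInitOptions.getD k none = none := by fin_cases hk <;> decide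
    cases pvLastAux k argv.reverse <;> simp [h0]
  simp only [pvGroups, List.map_cons, List.map_nil]
  rw [hval "prompt_toolkit" (by simp), hval "autocomplete" (by simp),
      hval "startup_banner" (by simp), hval "startup_sync" (by simp),
      hval "startup_sound" (by simp)]
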